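-- pv_equiv track=rewrite | github.com/Anuja-jayasinghe/Python-ranking-calculator | app.py | get_standard_competition_ranks
-- ===== SOURCE A (Python) =====
-- def get_standard_competition_ranks(marks):
--     sorted_marks = sorted(enumerate(marks), key=lambda x: -x[1])
--     ranks = [0] * len(marks)
--     current_rank = 1
--     for i, (original_index, mark) in enumerate(sorted_marks):
--         if i == 0 or mark != sorted_marks[i - 1][1]:
--             current_rank = i + 1
--         ranks[original_index] = current_rank
--     return ranks
-- ===== SOURCE B (Python) =====
-- def get_standard_competition_ranks(marks):
--     return [1 + sum(1 for x in marks if x > m) for m in marks]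
-- ===== Notes on version B (the rewrite author's own statement) =====
-- stated objective: simpler
-- what changed: Replaces the sort + run-grouping scan with a one-line comprehension: each mark's rank is 1 + the count of strictly greater marks.
import Mathlib
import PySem

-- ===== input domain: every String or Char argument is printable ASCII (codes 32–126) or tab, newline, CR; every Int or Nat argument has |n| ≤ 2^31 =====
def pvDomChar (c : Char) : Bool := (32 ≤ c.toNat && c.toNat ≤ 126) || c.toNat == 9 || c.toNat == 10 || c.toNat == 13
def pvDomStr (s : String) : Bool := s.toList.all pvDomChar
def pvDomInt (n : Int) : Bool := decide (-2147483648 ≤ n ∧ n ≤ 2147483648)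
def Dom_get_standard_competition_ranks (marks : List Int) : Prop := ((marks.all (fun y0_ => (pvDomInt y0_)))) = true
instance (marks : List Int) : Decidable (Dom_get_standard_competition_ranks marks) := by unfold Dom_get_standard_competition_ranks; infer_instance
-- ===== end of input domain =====

-- B replaces A's sort + run-grouping scan by a direct comprehension (each mark's rank is
-- 1 + the number of strictly greater marks); objective: simpler, not faster.

-- ===== PORT A =====
-- loop body of A; sorted_marks[i-1] is read only when i ≥ 1, so the pyGetD default is never used
def rankStep (sorted_marks : List (Int × Int)) (st : List Int × Int) (p : Int × (Int × Int)) : List Int × Int :=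
  let i := p.1
  let original_index := p.2.1
  let mark := p.2.2
  let current_rank := if i == 0 || !(mark == (PySem.List.pyGetD sorted_marks (i - 1) (0, 0)).2) then i + 1 else st.2
  (PySem.List.pySetD st.1 original_index current_rank, current_rank)

def get_standard_competition_ranks (marks : List Int) : List Int :=
  let sorted_marks := PySem.List.sorted (PySem.List.enumerate marks) (fun x => -x.2)
  ((PySem.List.enumerate sorted_marks).foldl (rankStep sorted_marks) (List.replicate marks.length 0, 1)).1

-- ===== PORT B =====
def get_standard_competition_ranks_alt (marks : List Int) : List Int :=
  marks.map (fun m => 1 + ((marks.countP (fun x => decide (m < x)) : Nat) : Int))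

-- ===== PRECONDITION & SPEC =====
def Spec_get_standard_competition_ranks (marks : List Int) (out : List Int) : Prop := out = get_standard_competition_ranks_alt marks
instance (marks : List Int) (out : List Int) : Decidable (Spec_get_standard_competition_ranks marks out) := by unfold Spec_get_standard_competition_ranks; infer_instance

-- ===== CLAIM (what is proved, stated in full; the proofs are below) =====
def Claim_equal_get_standard_competition_ranks : Prop := ∀ (marks : List Int), Dom_get_standard_competition_ranks marks → Spec_get_standard_competition_ranks marks (get_standard_competition_ranks marks)

-- ===== LEMMAS AND PROOFS =====

-- the rank B assigns to value v
def pvRank (marks : List Int) (v : Int) : Int := 1 + ((marks.countP (fun x => decide (v < x)) : Nat) : Int)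

-- the sequence of writes A performs, with the rank each write stores
def pvApply (marks : List Int) (u : List (Int × Int)) (acc : List Int) : List Int :=
  u.foldl (fun a p => PySem.List.pySetD a p.1 (pvRank marks p.2)) acc

lemma pv_countP_from_pointwise (s : List (Int × Int)) (v : Int) (t : Nat) (ht : t ≤ s.length)
    (h1 : ∀ j (hj : j < s.length), j < t → v < s[j].2)
    (h2 : ∀ j (hj : j < s.length), t ≤ j → ¬ v < s[j].2) :
    s.countP (fun p => decide (v < p.2)) = t := by
  conv_lhs => rw [← List.take_append_drop t s]
  rw [List.countP_append]
  have hta : (s.take t).countP (fun p => decide (v < p.2)) = (s.take t).length := by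
    rw [List.countP_eq_length]
    intro a ha
    obtain ⟨i, hi, rfl⟩ := List.mem_iff_getElem.mp ha
    have hit : i < t := by rw [List.length_take] at hi; omega
    have hil : i < s.length := by omega
    simp only [List.getElem_take]
    simpa using h1 i hil hit
  have hdr : (s.drop t).countP (fun p => decide (v < p.2)) = 0 := by
    rw [List.countP_eq_zero]
    intro a ha
    obtain ⟨i, hi, rfl⟩ := List.mem_iff_getElem.mp ha
    have hil : t + i < s.length := by rw [List.length_drop] at hi; omega
    simp only [List.getElem_drop]
    simpa using h2 (t + i) hil (by omega)
  rw [hta, hdr, List.length_take]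
  omega

-- at a block start t (first element of a run of equal values), the strictly-greater count is t
lemma pv_countP_block (s : List (Int × Int))
    (hmono : ∀ i j (hi : i < s.length) (hj : j < s.length), i ≤ j → s[j].2 ≤ s[i].2)
    (t : Nat) (ht : t < s.length)
    (hnew : t = 0 ∨ s[t].2 ≠ (s[t-1]'(by omega)).2) :
    s.countP (fun p => decide (s[t].2 < p.2)) = t := by
  apply pv_countP_from_pointwise s _ t (by omega)
  · intro j hj hjt
    have h0 : t ≠ 0 := by omega
    have hne : s[t].2 ≠ (s[t-1]'(by omega)).2 := hnew.resolve_left h0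
    have hle1 : s[t].2 ≤ (s[t-1]'(by omega)).2 := hmono (t-1) t (by omega) ht (by omega)
    have hle2 : (s[t-1]'(by omega)).2 ≤ s[j].2 := hmono j (t-1) hj (by omega) (by omega)
    omega
  · intro j hj hjt
    have := hmono t j ht hj hjt
    omega

lemma pv_length_pvApply (marks : List Int) (u : List (Int × Int)) (acc : List Int) :
    (pvApply marks u acc).length = acc.length := by
  induction u generalizing acc with
  | nil => rfl
  | cons q u' ih => simp [pvApply, List.foldl_cons] at *; rw [ih, PySem.List.length_pySetD]

lemma pv_pvApply_not_mem (marks : List Int) (u : List (Int × Int)) (acc : List Int) (j : Nat)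
    (hnn : ∀ p ∈ u, 0 ≤ p.1) (hj : ∀ p ∈ u, p.1 ≠ (j : Int)) :
    (pvApply marks u acc)[j]? = acc[j]? := by
  induction u generalizing acc with
  | nil => rfl
  | cons q u' ih =>
    have h0 : 0 ≤ q.1 := hnn q (by simp)
    have hq : q.1 ≠ (j : Int) := hj q (by simp)
    simp only [pvApply, List.foldl_cons]
    rw [show (u'.foldl (fun a p => PySem.List.pySetD a p.1 (pvRank marks p.2))
        (PySem.List.pySetD acc q.1 (pvRank marks q.2))) = pvApply marks u' (PySem.List.pySetD acc q.1 (pvRank marks q.2)) from rfl]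
    rw [ih _ (fun p hp => hnn p (by simp [hp])) (fun p hp => hj p (by simp [hp]))]
    rw [PySem.List.pySetD_of_nonneg _ _ h0]
    exact List.getElem?_set_ne (by omega)

lemma pv_pvApply_mem (marks : List Int) (u : List (Int × Int)) (acc : List Int) (j : Nat) (v : Int)
    (hnn : ∀ p ∈ u, 0 ≤ p.1) (hnd : (u.map (·.1)).Nodup)
    (hmem : ((j : Int), v) ∈ u) (hj : j < acc.length) :
    (pvApply marks u acc)[j]? = some (pvRank marks v) := by
  induction u generalizing acc with
  | nil => simp at hmem
  | cons q u' ih =>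
    simp only [pvApply, List.foldl_cons]
    rw [show (u'.foldl (fun a p => PySem.List.pySetD a p.1 (pvRank marks p.2))
        (PySem.List.pySetD acc q.1 (pvRank marks q.2))) = pvApply marks u' (PySem.List.pySetD acc q.1 (pvRank marks q.2)) from rfl]
    simp only [List.map_cons, List.nodup_cons] at hnd
    by_cases hq : q.1 = (j : Int)
    · have hqe : q = ((j : Int), v) := by
        rcases List.mem_cons.mp hmem with h | h
        · exact h.symm
        · exact absurd (by rw [hq]; exact List.mem_map.mpr ⟨_, h, rfl⟩ : q.1 ∈ u'.map (·.1)) hnd.1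
      rw [pv_pvApply_not_mem _ _ _ _ (fun p hp => hnn p (by simp [hp]))
        (fun p hp hpj => hnd.1 (by rw [hq, ← hpj]; exact List.mem_map.mpr ⟨_, hp, rfl⟩))]
      subst hqe
      rw [PySem.List.pySetD_of_nonneg _ _ (by simp)]
      simp only [Int.toNat_natCast]
      exact List.getElem?_set_self hj
    · have hmem' : ((j : Int), v) ∈ u' := by
        rcases List.mem_cons.mp hmem with h | h
        · exact absurd (by rw [← h]) hq
        · exact h
      exact ih _ (fun p hp => hnn p (by simp [hp])) hnd.2 hmem'
        (by rw [PySem.List.length_pySetD]; exact hj)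

-- the loop of A, started at position t with a correct carried rank, performs exactly the writes pvApply does
lemma pv_loop_eq (marks : List Int) (s : List (Int × Int))
    (hmono : ∀ i j (hi : i < s.length) (hj : j < s.length), i ≤ j → s[j].2 ≤ s[i].2)
    (hcount : ∀ v, s.countP (fun p => decide (v < p.2)) = marks.countP (fun x => decide (v < x))) :
    ∀ (u : List (Int × Int)) (t : Nat) (acc : List Int) (cr : Int),
      s.drop t = u →
      (∀ (ht : t < s.length), t ≠ 0 → s[t].2 = (s[t-1]'(by omega)).2 → cr = pvRank marks s[t].2) →
      ((PySem.List.enumerate u (t : Int)).foldl (rankStep s) (acc, cr)).1 = pvApply marks u acc := by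
  intro u
  induction u with
  | nil => intro t acc cr _ _; rfl
  | cons q u' ih =>
    intro t acc cr hdrop hinv
    have ht : t < s.length := by
      by_contra h
      rw [List.drop_eq_nil_of_le (by omega)] at hdrop
      cases hdrop
    have hcons : s[t] :: s.drop (t + 1) = q :: u' := by
      rw [← List.drop_eq_getElem_cons ht, hdrop]
    have hq : s[t] = q := by injection hcons
    have hdrop' : s.drop (t + 1) = u' := by injection hcons
    -- the rank written at this step
    have hblock : ∀ (_ : t = 0 ∨ s[t].2 ≠ (s[t-1]'(by omega)).2),
        ((t : Int) + 1) = pvRank marks q.2 := by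
      intro hnew
      have h1 := pv_countP_block s hmono t ht hnew
      have h2 := hcount s[t].2
      rw [h1, hq] at h2
      rw [pvRank]
      omega
    have hstep : rankStep s (acc, cr) ((t : Int), q)
        = (PySem.List.pySetD acc q.1 (pvRank marks q.2), pvRank marks q.2) := by
      by_cases h0 : t = 0
      · subst h0
        have := hblock (Or.inl rfl)
        simp [rankStep, ← this]
      · have hprev : (PySem.List.pyGetD s ((t : Int) - 1) (0, 0)) = s[t-1]'(by omega) := by
          rw [show ((t : Int) - 1) = ((t - 1 : Nat) : Int) by omega]
          rw [PySem.List.pyGetD_natCast]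
          exact List.getD_eq_getElem _ _ (by omega)
        by_cases hne : q.2 = (s[t-1]'(by omega)).2
        · have hcr : cr = pvRank marks q.2 := by
            rw [← hq]; exact hinv ht h0 (by rw [hq]; exact hne)
          have hcr' : cr = pvRank marks (s[t-1]'(by omega)).2 := by rw [hcr, hne]
          simp [rankStep, hprev, hne, h0, hcr']
        · have := hblock (Or.inr (by rw [hq]; exact hne))
          simp [rankStep, hprev, hne, h0, ← this]
    rw [PySem.List.enumerate_cons, List.foldl_cons, hstep]
    rw [show ((t : Int) + 1) = ((t + 1 : Nat) : Int) by omega]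
    rw [ih (t + 1) _ _ hdrop' ?_]
    · rfl
    · intro ht1 _ heq
      have : s[t+1].2 = q.2 := by
        rw [heq]; simp only [Nat.add_sub_cancel]; rw [hq]
      rw [this]

-- ===== VERDICT (by name: the statement is the Claim_ definition above) =====
theorem get_standard_competition_ranks_spec : Claim_equal_get_standard_competition_ranks := by
  intro marks _
  show get_standard_competition_ranks marks = get_standard_competition_ranks_alt marks
  have he : ∀ p ∈ PySem.List.enumerate marks, ∃ (k : Nat) (h : k < marks.length), p = ((k : Int), marks[k]) := by
    intro p hp
    obtain ⟨k, hk, hpk⟩ := (PySem.List.mem_enumerate_iff _ _ _).mp hp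
    exact ⟨k, hk, by simpa using hpk⟩
  set s := PySem.List.sorted (PySem.List.enumerate marks) (fun x => -x.2) with hs
  have hperm : s.Perm (PySem.List.enumerate marks) := PySem.List.sorted_perm _ _ _
  have hmem_s : ∀ p ∈ s, ∃ (k : Nat) (h : k < marks.length), p = ((k : Int), marks[k]) :=
    fun p hp => he p (hperm.mem_iff.mp hp)
  have hmono : ∀ i j (hi : i < s.length) (hj : j < s.length), i ≤ j → s[j].2 ≤ s[i].2 := by
    intro i j hi hj hij
    rcases Nat.eq_or_lt_of_le hij with h | h
    · subst h; exact le_refl _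
    · have hp := PySem.List.sorted_pairwise (PySem.List.enumerate marks) (fun x => -x.2)
      have := (List.pairwise_iff_getElem.mp hp) i j hi hj h
      simpa using this
  have hcount : ∀ v, s.countP (fun p => decide (v < p.2)) = marks.countP (fun x => decide (v < x)) := by
    intro v
    rw [hperm.countP_eq]
    conv_rhs => rw [← PySem.List.map_snd_enumerate marks 0, List.countP_map]
    rfl
  have hloop := pv_loop_eq marks s hmono hcount s 0 (List.replicate marks.length 0) 1
    (by simp) (by intro _ h0 _; exact absurd rfl h0)
  rw [Nat.cast_zero] at hloop
  show ((PySem.List.enumerate s).foldl (rankStep s) (List.replicate marks.length 0, 1)).1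
      = get_standard_competition_ranks_alt marks
  rw [hloop]
  -- compare pointwise
  have hnn : ∀ p ∈ s, 0 ≤ p.1 := by
    intro p hp
    obtain ⟨k, _, rfl⟩ := hmem_s p hp
    simp
  have hnd : (s.map (·.1)).Nodup := by
    have h1 : ((PySem.List.enumerate marks).map (·.1)).Pairwise (· < ·) := by
      rw [List.pairwise_map]
      exact PySem.List.pairwise_lt_enumerate marks 0
    exact ((hperm.map (fun p : Int × Int => p.1)).nodup_iff).mpr (h1.imp (fun h => ne_of_lt h))
  apply List.ext_getElem?
  intro j
  by_cases hj : j < marks.length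
  · have hmem : ((j : Int), marks[j]) ∈ s := by
      rw [hperm.mem_iff]
      exact (PySem.List.mem_enumerate_iff marks 0 ((j : Int), marks[j])).mpr ⟨j, hj, by simp⟩
    rw [pv_pvApply_mem marks s _ j marks[j] hnn hnd hmem (by simp [hj])]
    rw [get_standard_competition_ranks_alt]
    rw [List.getElem?_map, List.getElem?_eq_getElem hj]
    rfl
  · have h1 : (pvApply marks s (List.replicate marks.length 0)).length ≤ j := by
      rw [pv_length_pvApply, List.length_replicate]; omega
    have h2 : (get_standard_competition_ranks_alt marks).length ≤ j := by
      rw [get_standard_competition_ranks_alt, List.length_map]; omega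
    rw [List.getElem?_eq_none h1, List.getElem?_eq_none h2]
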